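-- pv_equiv track=rewrite | github.com/Darkduv/Project-Euler | Project Euler/Problemes seuls resolus/Problem_148.py | f
-- ===== SOURCE A (Python) =====
-- def base7(n):
--     ll = []
--     while n > 0:
--         ll.append(n % 7)
--         n //= 7
--     return ll[::-1]
--
-- def f(n):
--     l_n = base7(n)
--     s = 0
--     a = 1
--     for i, d in enumerate(l_n):
--         j = len(l_n) - 1 - i
--         for k in range(0, d):
--             s += 28 ** j * (k + 1) * a
--         a *= (d + 1)
--     return s
-- ===== SOURCE B (Python) =====
-- def f(n):
--     # Recurse on n // 7 (least-significant digit first): no digit list, no inner loop.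
--     # For n = 7*q + d:  s(n) = 28*s(q) + d*(d+1)//2 * prod(q),  prod(n) = prod(q)*(d+1),
--     # where prod is the product of (digit+1) over all base-7 digits.
--     def rec(m):
--         if m <= 0:
--             return (0, 1)
--         s, a = rec(m // 7)
--         d = m % 7
--         return (28 * s + d * (d + 1) // 2 * a, a * (d + 1))
--     return rec(n)[0]
-- ===== Notes on version B (the rewrite author's own statement) =====
-- stated objective: simpler
-- what changed: Replaces the digit-list construction plus doubly nested loop (inner sum over each digit) by a single recursion on the base-seven quotient that uses the closed-form triangular number of each digit and threads the running product, so no list and no inner loop exist.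
import Mathlib
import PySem

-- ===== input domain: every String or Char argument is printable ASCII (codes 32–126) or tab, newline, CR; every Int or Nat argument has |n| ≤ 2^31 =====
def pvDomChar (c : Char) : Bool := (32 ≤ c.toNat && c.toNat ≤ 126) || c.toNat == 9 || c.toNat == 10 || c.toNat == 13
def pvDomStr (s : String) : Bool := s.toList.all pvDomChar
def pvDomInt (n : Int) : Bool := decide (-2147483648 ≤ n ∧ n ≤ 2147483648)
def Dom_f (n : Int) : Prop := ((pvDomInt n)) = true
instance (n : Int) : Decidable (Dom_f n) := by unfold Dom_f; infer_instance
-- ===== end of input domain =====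

-- B replaces A's digit list + doubly nested loop by a single recursion on n//7 using the
-- closed-form triangular number d*(d+1)//2 (objective: simpler).

-- ===== PORT A =====
-- while n > 0: ll.append(n % 7); n //= 7
def base7Loop (n : Int) (ll : List Int) : List Int :=
  if 0 < n then base7Loop (PySem.Int.floordiv n 7) (ll ++ [PySem.Int.mod n 7])
  else ll
termination_by n.toNat
decreasing_by
  simp only [PySem.Int.floordiv_eq_ediv_of_pos (show (0:Int) < 7 by norm_num)]
  omega

-- ll[::-1] : exact by PySem.List.slice?_none_none_neg_one (s[::-1] is reverse)
def base7 (n : Int) : List Int := (base7Loop n []).reverse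

-- the body of A's `for i, d in enumerate(l_n)` loop, state (s, a); p = (i, d)
def fBody (lenLn : Nat) (sa : Int × Int) (p : Int × Int) : Int × Int :=
  let j : Int := (lenLn : Int) - 1 - p.1
  -- 28 ** j : at every iteration p.1 < lenLn so j ≥ 0, hence ^ j.toNat is exact
  let s := (PySem.List.pyRange 0 p.2 1).foldl
    (fun s k => s + 28 ^ j.toNat * (k + 1) * sa.2) sa.1
  (s, sa.2 * (p.2 + 1))

def f (n : Int) : Int :=
  let l_n := base7 n
  ((PySem.List.enumerate l_n 0).foldl (fBody l_n.length) (0, 1)).1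

-- ===== PORT B =====
def fAltRec (m : Int) : Int × Int :=
  if m ≤ 0 then (0, 1)
  else
    let p := fAltRec (PySem.Int.floordiv m 7)
    let d := PySem.Int.mod m 7
    (28 * p.1 + PySem.Int.floordiv (d * (d + 1)) 2 * p.2, p.2 * (d + 1))
termination_by m.toNat
decreasing_by
  simp only [PySem.Int.floordiv_eq_ediv_of_pos (show (0:Int) < 7 by norm_num)]
  omega

def f_alt (n : Int) : Int := (fAltRec n).1

-- ===== PRECONDITION & SPEC =====
def Spec_f (n : Int) (out : Int) : Prop := out = f_alt n
instance (n : Int) (out : Int) : Decidable (Spec_f n out) := by unfold Spec_f; infer_instance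

-- ===== CLAIM (what is proved, stated in full; the proofs are below) =====
def Claim_equal_f : Prop := ∀ (n : Int), Dom_f n → Spec_f n (f n)

-- ===== LEMMAS AND PROOFS =====

-- triangular number d*(d+1)//2, as B computes it
def pvTri (d : Int) : Int := PySem.Int.floordiv (d * (d + 1)) 2

-- base-7 digits, least significant first (proof-side characterisation)
def pvLsb (n : Int) : List Int :=
  if 0 < n then PySem.Int.mod n 7 :: pvLsb (PySem.Int.floordiv n 7)
  else []
termination_by n.toNat
decreasing_by
  simp only [PySem.Int.floordiv_eq_ediv_of_pos (show (0:Int) < 7 by norm_num)]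
  omega

-- B's recursion as a function of the LSB-first digit list
def pvSP : List Int → Int × Int
  | [] => (0, 1)
  | d :: r =>
    let p := pvSP r
    (28 * p.1 + pvTri d * p.2, p.2 * (d + 1))

lemma pvSP_cons (d : Int) (r : List Int) :
    pvSP (d :: r) = (28 * (pvSP r).1 + pvTri d * (pvSP r).2, (pvSP r).2 * (d + 1)) := rfl

lemma pvTri_int (d : Int) : 2 * pvTri d = d * (d + 1) := by
  obtain ⟨t, ht⟩ := (Int.even_mul_succ_self d).two_dvd
  simp [pvTri, ht, Int.mul_ediv_cancel_left t (by norm_num : (2 : Int) ≠ 0)]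

lemma pvTri_succ (d : Int) : pvTri (d + 1) = pvTri d + (d + 1) := by
  have h1 := pvTri_int d
  have h2 := pvTri_int (d + 1)
  nlinarith [h1, h2]

lemma pvInnerSum (c a : Int) : ∀ (d : Nat) (s : Int),
    (PySem.List.pyRange 0 (d : Int) 1).foldl (fun s k => s + c * (k + 1) * a) s
      = s + c * pvTri (d : Int) * a := by
  intro d
  induction d with
  | zero =>
    intro s
    rw [PySem.List.pyRange_one_eq_nil (by omega)]
    have h0 : pvTri 0 = 0 := by decide
    simp [h0]
  | succ d ih =>
    intro s
    rw [show ((d + 1 : Nat) : Int) = (d : Int) + 1 by push_cast; ring,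
      PySem.List.pyRange_one_succ_right (by positivity), List.foldl_append]
    simp only [List.foldl_cons, List.foldl_nil, ih, pvTri_succ]
    ring

lemma base7Loop_acc : ∀ (k : Nat) (n : Int), n.toNat ≤ k →
    ∀ ll, base7Loop n ll = ll ++ base7Loop n [] := by
  intro k
  induction k with
  | zero =>
    intro n hn ll
    have h : ¬ 0 < n := by omega
    rw [base7Loop.eq_def, if_neg h]
    conv_rhs => rw [base7Loop.eq_def, if_neg h]
    simp
  | succ k ih =>
    intro n hn ll
    by_cases h : 0 < n
    · have hq : (PySem.Int.floordiv n 7).toNat ≤ k := by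
        simp only [PySem.Int.floordiv_eq_ediv_of_pos (show (0:Int) < 7 by norm_num)]
        omega
      rw [base7Loop.eq_def, if_pos h, ih _ hq (ll ++ [PySem.Int.mod n 7])]
      conv_rhs => rw [base7Loop.eq_def, if_pos h, ih _ hq ([] ++ [PySem.Int.mod n 7])]
      simp
    · rw [base7Loop.eq_def, if_neg h]
      conv_rhs => rw [base7Loop.eq_def, if_neg h]
      simp

lemma base7Loop_eq_pvLsb : ∀ (n : Int), base7Loop n [] = pvLsb n := by
  have H : ∀ (k : Nat) (n : Int), n.toNat ≤ k → base7Loop n [] = pvLsb n := by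
    intro k
    induction k with
    | zero =>
      intro n hn
      have h : ¬ 0 < n := by omega
      rw [base7Loop.eq_def, if_neg h, pvLsb.eq_def, if_neg h]
    | succ k ih =>
      intro n hn
      by_cases h : 0 < n
      · have hq : (PySem.Int.floordiv n 7).toNat ≤ k := by
          simp only [PySem.Int.floordiv_eq_ediv_of_pos (show (0:Int) < 7 by norm_num)]
          omega
        rw [base7Loop.eq_def, if_pos h, base7Loop_acc k _ hq, ih _ hq]
        conv_rhs => rw [pvLsb.eq_def, if_pos h]
        simp
      · rw [base7Loop.eq_def, if_neg h, pvLsb.eq_def, if_neg h]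
  exact fun n => H n.toNat n le_rfl

lemma pvLsb_nonneg : ∀ (n : Int), ∀ d ∈ pvLsb n, 0 ≤ d := by
  have H : ∀ (k : Nat) (n : Int), n.toNat ≤ k → ∀ d ∈ pvLsb n, 0 ≤ d := by
    intro k
    induction k with
    | zero =>
      intro n hn
      have h : ¬ 0 < n := by omega
      rw [pvLsb.eq_def, if_neg h]
      simp
    | succ k ih =>
      intro n hn
      by_cases h : 0 < n
      · have hq : (PySem.Int.floordiv n 7).toNat ≤ k := by
          simp only [PySem.Int.floordiv_eq_ediv_of_pos (show (0:Int) < 7 by norm_num)]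
          omega
        rw [pvLsb.eq_def, if_pos h]
        intro d hd
        rcases List.mem_cons.mp hd with h1 | h2
        · subst h1; exact PySem.Int.mod_nonneg _ (by norm_num)
        · exact ih _ hq d h2
      · rw [pvLsb.eq_def, if_neg h]; simp
  exact fun n => H n.toNat n le_rfl

lemma fAltRec_eq_pvSP : ∀ (n : Int), fAltRec n = pvSP (pvLsb n) := by
  have H : ∀ (k : Nat) (n : Int), n.toNat ≤ k → fAltRec n = pvSP (pvLsb n) := by
    intro k
    induction k with
    | zero =>
      intro n hn
      have h1 : n ≤ 0 := by omega
      have h2 : ¬ 0 < n := by omega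
      rw [fAltRec.eq_def, if_pos h1, pvLsb.eq_def, if_neg h2]
      rfl
    | succ k ih =>
      intro n hn
      by_cases h : n ≤ 0
      · have h2 : ¬ 0 < n := by omega
        rw [fAltRec.eq_def, if_pos h, pvLsb.eq_def, if_neg h2]
        rfl
      · have hq : (PySem.Int.floordiv n 7).toNat ≤ k := by
          simp only [PySem.Int.floordiv_eq_ediv_of_pos (show (0:Int) < 7 by norm_num)]
          omega
        have h2 : 0 < n := by omega
        rw [fAltRec.eq_def, if_neg h, ih _ hq]
        conv_rhs => rw [pvLsb.eq_def, if_pos h2]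
        rfl
  exact fun n => H n.toNat n le_rfl

lemma outer_loop : ∀ (L : List Int), (∀ d ∈ L, 0 ≤ d) → ∀ (t : Nat) (s a : Int),
    (PySem.List.enumerate L.reverse 0).foldl (fBody (L.length + t)) (s, a)
      = (s + 28 ^ t * (pvSP L).1 * a, a * (pvSP L).2) := by
  intro L
  induction L with
  | nil => intro _ t s a; simp [pvSP, PySem.List.enumerate_nil]
  | cons d r ih =>
    intro hnn t s a
    have hd : 0 ≤ d := hnn d (List.mem_cons_self)
    have hr : ∀ x ∈ r, 0 ≤ x := fun x hx => hnn x (List.mem_cons_of_mem _ hx)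
    rw [List.reverse_cons, PySem.List.enumerate_append, List.foldl_append]
    have hlen : (d :: r).length + t = r.length + (t + 1) := by
      simp only [List.length_cons]; omega
    rw [hlen, ih hr (t + 1) s a]
    rw [PySem.List.enumerate_cons, PySem.List.enumerate_nil]
    simp only [List.foldl_cons, List.foldl_nil, fBody, List.length_reverse]
    have hj : ((r.length + (t + 1) : Nat) : Int) - 1 - ((0 : Int) + (r.length : Int)) = (t : Int) := by
      push_cast; ring
    rw [hj]
    have hjt : ((t : Int)).toNat = t := by omega
    rw [hjt]
    have hdnat : d = ((d.toNat : Nat) : Int) := (Int.toNat_of_nonneg hd).symm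
    rw [hdnat, pvInnerSum, ← hdnat]
    rw [pvSP_cons, Prod.mk.injEq]
    refine ⟨?_, by ring⟩
    rw [pow_succ]
    ring

-- ===== VERDICT (by name: the statement is the Claim_ definition above) =====
theorem f_spec : Claim_equal_f := by
  intro n _
  unfold Spec_f
  have hb : base7 n = (pvLsb n).reverse := by rw [base7, base7Loop_eq_pvLsb]
  have hL := outer_loop (pvLsb n) (pvLsb_nonneg n) 0 0 1
  simp only [Nat.add_zero] at hL
  show ((PySem.List.enumerate (base7 n) 0).foldl (fBody (base7 n).length) (0, 1)).1 = f_alt n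
  rw [hb, List.length_reverse, hL]
  simp [f_alt, fAltRec_eq_pvSP]
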